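-- pv_equiv track=rewrite | github.com/Ktwsz/wdi-zestaw2 | 1.py | foo
-- ===== SOURCE A (Python) =====
-- def gen(a, b, n):
--     c, d = a, b
--     while d <= 1000000:
--         c, d = d, c+d
--         if c * a == n:
--             return True
--     return False
--
-- def foo(n):
--     a, b = 0, 1
--     while b <= 1000000:
--         a, b = b, a+b
--         if n % a == 0:
--             if gen(a, b, n):
--                 return True
--     return False
-- ===== SOURCE B (Python) =====
-- def foo(n):
--     fibs = []
--     a, b = 0, 1
--     while b <= 1000000:
--         a, b = b, a + b
--         fibs.append(a)
--     while fibs: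
--         x = fibs.pop(0)
--         for y in fibs:
--             if x * y == n:
--                 return True
--     return False
-- ===== Notes on version B (the rewrite author's own statement) =====
-- stated objective: simpler
-- what changed: B precomputes the Fibonacci numbers up to 1000000 once into a list and then scans ordered index pairs for a product equal to n, replacing A's helper that regenerates the Fibonacci tail for every divisor of n and dropping the redundant n % a == 0 filter.
import Mathlib
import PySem

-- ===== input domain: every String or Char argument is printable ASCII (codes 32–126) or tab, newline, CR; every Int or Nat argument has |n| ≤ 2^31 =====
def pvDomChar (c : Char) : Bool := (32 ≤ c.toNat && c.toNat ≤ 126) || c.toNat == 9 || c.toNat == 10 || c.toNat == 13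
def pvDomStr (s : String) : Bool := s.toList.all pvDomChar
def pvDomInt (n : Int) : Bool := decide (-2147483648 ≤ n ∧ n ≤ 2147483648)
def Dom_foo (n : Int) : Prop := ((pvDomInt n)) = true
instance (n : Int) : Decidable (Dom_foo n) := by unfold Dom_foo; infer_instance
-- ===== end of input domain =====

-- B replaces A's per-divisor regeneration of the Fibonacci tail by one precomputed
-- Fibonacci table plus a scan of ordered pairs (objective: simpler; not faster).

-- ===== PORT A =====
-- gen(a, b, n): while d <= 1000000: c, d = d, c+d; if c*a == n: return True
-- (fuel is only a totality guard; 40 units always outlast the concrete loop)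
def genLoop (a n c d : Int) : Nat → Bool
  | 0 => false
  | f + 1 =>
    if d ≤ 1000000 then
      if d * a == n then true else genLoop a n d (c + d) f
    else false

-- foo's while loop; the remaining fuel is passed to gen's loop (always sufficient)
def fooLoop (n a b : Int) : Nat → Bool
  | 0 => false
  | f + 1 =>
    if b ≤ 1000000 then
      if PySem.Int.mod n b == 0 then
        if genLoop b n b (a + b) f then true else fooLoop n b (a + b) f
      else fooLoop n b (a + b) f
    else false

def foo (n : Int) : Bool := fooLoop n 0 1 40

-- ===== PORT B =====
-- while b <= 1000000: a, b = b, a+b; fibs.append(a)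
def fibBuild (a b : Int) (acc : List Int) : Nat → List Int
  | 0 => acc
  | f + 1 => if b ≤ 1000000 then fibBuild b (a + b) (acc ++ [b]) f else acc

-- while fibs: x = fibs.pop(0); for y in fibs: if x*y == n: return True
def pairLoop (n : Int) : List Int → Bool
  | [] => false
  | x :: xs => if xs.any (fun y => x * y == n) then true else pairLoop n xs

def foo_alt (n : Int) : Bool := pairLoop n (fibBuild 0 1 [] 40)

-- ===== PRECONDITION & SPEC =====
def Spec_foo (n : Int) (out : Bool) : Prop := out = foo_alt n
instance (n : Int) (out : Bool) : Decidable (Spec_foo n out) := by unfold Spec_foo; infer_instance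

-- ===== CLAIM (what is proved, stated in full; the proofs are below) =====
def Claim_equal_foo : Prop := ∀ (n : Int), Dom_foo n → Spec_foo n (foo n)

-- ===== LEMMAS AND PROOFS =====

theorem fibBuild_acc (f : Nat) : ∀ (a b : Int) (acc : List Int),
    fibBuild a b acc f = acc ++ fibBuild a b [] f := by
  induction f with
  | zero => intro a b acc; simp [fibBuild]
  | succ f ih =>
    intro a b acc
    simp only [fibBuild]
    by_cases h : b ≤ 1000000
    · simp only [if_pos h]
      rw [ih b (a + b) (acc ++ [b]), ih b (a + b) ([] ++ [b])]
      simp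
    · simp [if_neg h]

-- gen's loop scans exactly the Fibonacci tail that fibBuild materialises
theorem genLoop_eq (f : Nat) : ∀ (a n c d : Int),
    genLoop a n c d f = (fibBuild c d [] f).any (fun y => y * a == n) := by
  induction f with
  | zero => intro a n c d; simp [genLoop, fibBuild]
  | succ f ih =>
    intro a n c d
    simp only [genLoop, fibBuild]
    by_cases h : d ≤ 1000000
    · simp only [if_pos h]
      rw [fibBuild_acc f d (c + d) ([] ++ [d])]
      simp only [List.nil_append, List.singleton_append, List.any_cons, ih]
      by_cases he : d * a = n <;> simp [he]
    · simp [if_neg h]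

theorem not_dvd_no_product (b y n : Int)
    (h : ¬ PySem.Int.mod n b = 0) : (b * y == n) = false := by
  simp only [beq_eq_false_iff_ne, ne_eq]
  intro he
  exact h ((PySem.Int.mod_eq_zero_iff_dvd n b).mpr ⟨y, he.symm⟩)

theorem fooLoop_eq (f : Nat) : ∀ (n a b : Int), 0 ≤ a → 1 ≤ b →
    fooLoop n a b f = pairLoop n (fibBuild a b [] f) := by
  induction f with
  | zero => intro n a b _ _; simp [fooLoop, fibBuild, pairLoop]
  | succ f ih =>
    intro n a b ha hb
    simp only [fooLoop, fibBuild]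
    by_cases h : b ≤ 1000000
    · simp only [if_pos h]
      rw [fibBuild_acc f b (a + b) ([] ++ [b])]
      simp only [List.nil_append, List.singleton_append, pairLoop]
      have hrec : fooLoop n b (a + b) f = pairLoop n (fibBuild b (a + b) [] f) :=
        ih n b (a + b) (by omega) (by omega)
      by_cases hd : PySem.Int.mod n b = 0
      · rw [if_pos (show (PySem.Int.mod n b == 0) = true by simpa using hd), genLoop_eq]
        have harg : (fibBuild b (a + b) [] f).any (fun y => y * b == n)
            = (fibBuild b (a + b) [] f).any (fun y => b * y == n) := by
          congr 1; funext y; rw [Int.mul_comm]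
        rw [harg, hrec]
      · rw [if_neg (show ¬ ((PySem.Int.mod n b == 0) = true) by simpa using hd), hrec]
        have hall : (fibBuild b (a + b) [] f).any (fun y => b * y == n) = false := by
          simp only [List.any_eq_false]
          intro y _
          simpa using not_dvd_no_product b y n hd
        rw [hall]
        simp
    · simp [if_neg h, pairLoop]

-- ===== VERDICT (by name: the statement is the Claim_ definition above) =====
theorem foo_spec : Claim_equal_foo := by
  intro n _
  unfold Spec_foo foo foo_alt
  exact fooLoop_eq 40 n 0 1 (by omega) (by omega)
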